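-- pv_equiv track=rewrite | github.com/rob256/botany | rob_bot.py | get_columns_with_space
-- ===== SOURCE A (Python) =====
-- def get_columns_with_space(board, token, preferred_locations):
--     columns_with_space = []
--     for column in preferred_locations:
--         if column == 3:
--             columns_with_space.append(column)
--             continue
--         space_count = 0
--         board_column = board[column]
--         for row in board_column[::-1]:
--             if row == '.' or row == token:
--                 space_count += 1
--             else:
--                 break
--         if space_count >= 4:
--             columns_with_space.append(column)
--     return columns_with_space
-- ===== SOURCE B (Python) =====
-- def get_columns_with_space(board, token, preferred_locations):
--     columns_with_space = []
--     for column in preferred_locations: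
--         if column == 3:
--             columns_with_space.append(column)
--             continue
--         board_column = board[column]
--         if len(board_column) >= 4 and all(
--                 cell == '.' or cell == token for cell in board_column[-4:]):
--             columns_with_space.append(column)
--     return columns_with_space
-- ===== Notes on version B (the rewrite author's own statement) =====
-- stated objective: simpler
-- what changed: Replaces the bottom-up counting loop with break by a closed-form window test: the column qualifies iff it has at least 4 cells and its last 4 cells are all open, so no counter and no break are needed.
import Mathlib
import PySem

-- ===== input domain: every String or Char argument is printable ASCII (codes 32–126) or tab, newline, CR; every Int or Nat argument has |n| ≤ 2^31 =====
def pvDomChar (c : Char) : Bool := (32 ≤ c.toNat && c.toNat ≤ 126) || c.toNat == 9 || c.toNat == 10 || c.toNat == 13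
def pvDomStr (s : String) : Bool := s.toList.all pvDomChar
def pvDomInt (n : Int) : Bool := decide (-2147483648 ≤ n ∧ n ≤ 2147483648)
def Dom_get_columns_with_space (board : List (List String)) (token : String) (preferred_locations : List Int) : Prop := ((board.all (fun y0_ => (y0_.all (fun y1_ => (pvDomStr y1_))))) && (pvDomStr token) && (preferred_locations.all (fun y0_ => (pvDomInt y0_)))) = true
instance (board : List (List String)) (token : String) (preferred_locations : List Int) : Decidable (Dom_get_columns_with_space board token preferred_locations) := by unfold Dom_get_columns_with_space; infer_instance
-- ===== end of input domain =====

-- B replaces A's bottom-up counting loop (with break) by a closed-form window test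
-- on the last four cells; objective: simpler.

-- ===== PORT A =====
-- inner 'for row in board_column[::-1]: count or break' loop of A
def pvSpaceCount (token : String) : List String → Int
  | [] => 0
  | r :: rest => if r = "." ∨ r = token then 1 + pvSpaceCount token rest else 0

def get_columns_with_space (board : List (List String)) (token : String) (preferred_locations : List Int) : List Int :=
  preferred_locations.foldl (fun columns_with_space column =>
    if column = 3 then columns_with_space ++ [column]
    else
      -- board[column]; none = IndexError, excluded by Pre_
      let board_column := (PySem.List.pyGet? board column).getD []
      -- board_column[::-1]
      let rev := (PySem.List.slice? board_column none none (-1)).getD []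
      let space_count := pvSpaceCount token rev
      if space_count ≥ 4 then columns_with_space ++ [column] else columns_with_space) []

-- ===== PORT B =====
def get_columns_with_space_alt (board : List (List String)) (token : String) (preferred_locations : List Int) : List Int :=
  preferred_locations.foldl (fun columns_with_space column =>
    if column = 3 then columns_with_space ++ [column]
    else
      -- board[column]; none = IndexError, excluded by Pre_
      let board_column := (PySem.List.pyGet? board column).getD []
      -- len(bc) >= 4 and all(cell == '.' or cell == token for cell in bc[-4:])
      if 4 ≤ board_column.length ∧
          (PySem.List.slice board_column (some (-4)) none).all
            (fun cell => cell == "." || cell == token)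
      then columns_with_space ++ [column] else columns_with_space) []

-- ===== PRECONDITION & SPEC =====
-- Pre_ excludes exactly the inputs where Python A raises IndexError: a preferred
-- column other than 3 that is not a valid (possibly negative) index into board.
def Pre_get_columns_with_space (board : List (List String)) (token : String) (preferred_locations : List Int) : Prop :=
  ∀ c ∈ preferred_locations, c ≠ 3 → (-(board.length : Int) ≤ c ∧ c < board.length)
instance (board : List (List String)) (token : String) (preferred_locations : List Int) : Decidable (Pre_get_columns_with_space board token preferred_locations) := by unfold Pre_get_columns_with_space; infer_instance

def pvWitness_get_columns_with_space : List (List String) × String × List Int :=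
  ([[".", ".", ".", "."], ["X", ".", ".", ".", "."]], "X", [0, 1, 3, -1])

def Spec_get_columns_with_space (board : List (List String)) (token : String) (preferred_locations : List Int) (out : List Int) : Prop := out = get_columns_with_space_alt board token preferred_locations
instance (board : List (List String)) (token : String) (preferred_locations : List Int) (out : List Int) : Decidable (Spec_get_columns_with_space board token preferred_locations out) := by unfold Spec_get_columns_with_space; infer_instance

-- ===== CLAIM (what is proved, stated in full; the proofs are below) =====
def Claim_equal_get_columns_with_space : Prop := ∀ (board : List (List String)) (token : String) (preferred_locations : List Int), Dom_get_columns_with_space board token preferred_locations → Pre_get_columns_with_space board token preferred_locations → Spec_get_columns_with_space board token preferred_locations (get_columns_with_space board token preferred_locations)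

-- ===== LEMMAS AND PROOFS =====

theorem pvSpaceCount_nonneg (token : String) (m : List String) : 0 ≤ pvSpaceCount token m := by
  induction m with
  | nil => simp [pvSpaceCount]
  | cons r rest ih => simp only [pvSpaceCount]; split <;> omega

-- the counted prefix reaches 4 iff the first four cells exist and are all open
theorem pvSpaceCount_ge_four (token : String) (m : List String) :
    (4 ≤ pvSpaceCount token m) ↔
      (4 ≤ m.length ∧ (m.take 4).all (fun cell => cell == "." || cell == token) = true) := by
  match m with
  | [] => simp [pvSpaceCount]
  | [a] => simp only [pvSpaceCount]; split_ifs <;> simp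
  | [a, b] => simp only [pvSpaceCount]; split_ifs <;> simp
  | [a, b, c] => simp only [pvSpaceCount]; split_ifs <;> simp
  | a :: b :: c :: d :: rest =>
    have hn := pvSpaceCount_nonneg token rest
    simp only [pvSpaceCount, List.take, List.all_cons, List.all_nil, List.length_cons,
      Bool.and_eq_true, Bool.or_eq_true, beq_iff_eq]
    constructor
    · intro h
      split_ifs at h with h1 h2 h3 h4
      · exact ⟨by omega, h1, h2, h3, h4, trivial⟩
      all_goals omega
    · rintro ⟨-, h1, h2, h3, h4, -⟩
      rw [if_pos h1, if_pos h2, if_pos h3, if_pos h4]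
      omega

-- A's bottom-up count over the reversed column reaches 4 iff B's window test holds
theorem cond_eq (token : String) (l : List String) :
    (4 ≤ pvSpaceCount token l.reverse) ↔
      (4 ≤ l.length ∧ (l.drop (l.length - 4)).all (fun cell => cell == "." || cell == token) = true) := by
  rw [pvSpaceCount_ge_four]
  have h1 : l.reverse.take 4 = (l.drop (l.length - 4)).reverse := by
    rw [List.take_reverse]
  rw [h1]
  simp

theorem foldl_eq (board : List (List String)) (token : String) (prefs : List Int)
    (h : ∀ c ∈ prefs, c ≠ 3 → (-(board.length : Int) ≤ c ∧ c < board.length)) (acc : List Int) :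
    prefs.foldl (fun columns_with_space column =>
      if column = 3 then columns_with_space ++ [column]
      else
        let board_column := (PySem.List.pyGet? board column).getD []
        let rev := (PySem.List.slice? board_column none none (-1)).getD []
        let space_count := pvSpaceCount token rev
        if space_count ≥ 4 then columns_with_space ++ [column] else columns_with_space) acc
    = prefs.foldl (fun columns_with_space column =>
      if column = 3 then columns_with_space ++ [column]
      else
        let board_column := (PySem.List.pyGet? board column).getD []
        if 4 ≤ board_column.length ∧
            (PySem.List.slice board_column (some (-4)) none).all
              (fun cell => cell == "." || cell == token)
        then columns_with_space ++ [column] else columns_with_space) acc := by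
  induction prefs generalizing acc with
  | nil => rfl
  | cons c cs ih =>
    simp only [List.foldl_cons]
    rw [ih (fun x hx => h x (List.mem_cons_of_mem _ hx))]
    congr 1
    by_cases hc : c = 3
    · simp [hc]
    · rw [if_neg hc, if_neg hc]
      set bc := (PySem.List.pyGet? board c).getD [] with hbc
      simp only [PySem.List.slice?_none_none_neg_one, Option.getD_some]
      have hslice : PySem.List.slice bc (some (-4)) none = bc.drop (bc.length - 4) := by
        exact PySem.List.slice_from_neg_ofNat bc 4 (by omega)
      rw [hslice]
      by_cases hcond : 4 ≤ pvSpaceCount token bc.reverse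
      · rw [if_pos hcond, if_pos ((cond_eq token bc).mp hcond)]
      · rw [if_neg hcond, if_neg (fun hr => hcond ((cond_eq token bc).mpr hr))]

-- ===== VERDICT (by name: the statement is the Claim_ definition above) =====
theorem get_columns_with_space_spec : Claim_equal_get_columns_with_space := by
  intro board token prefs _ hpre
  unfold Spec_get_columns_with_space get_columns_with_space get_columns_with_space_alt
  exact foldl_eq board token prefs hpre []
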